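-- pv_equiv track=rewrite | github.com/ilasaac/tecneterra_ros_rover | tools/monitor.py | _parse_fence_buf
-- ===== SOURCE A (Python) =====
-- def _parse_fence_buf(fence_buf: list) -> list:
--     """Parse raw fence vertex tuples (lat, lon, vertex_count) into polygon list."""
--     polygons = []
--     current  = []
--     expected = 0
--     for (lat, lon, vertex_count) in fence_buf:
--         if expected == 0:
--             expected = vertex_count
--         current.append([lat, lon])
--         if len(current) >= expected:
--             polygons.append(current)
--             current  = []
--             expected = 0
--     if current:
--         polygons.append(current)
--     return polygons
-- ===== SOURCE B (Python) =====
-- def _parse_fence_buf(fence_buf: list) -> list: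
--     """Parse raw fence vertex tuples (lat, lon, vertex_count) into polygon list."""
--     polygons = []
--     i = 0
--     n = len(fence_buf)
--     while i < n:
--         count = fence_buf[i][2]
--         size = count if count > 0 else 1
--         polygons.append([[lat, lon] for (lat, lon, _) in fence_buf[i:i + size]])
--         i += size
--     return polygons
-- ===== Notes on version B (the rewrite author's own statement) =====
-- stated objective: simpler
-- what changed: Replaces A's element-by-element fold with mutable current/expected state by index-based chunking: read the leading vertex_count, slice that many tuples out of the buffer at once, and advance the pointer.
import Mathlib
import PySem

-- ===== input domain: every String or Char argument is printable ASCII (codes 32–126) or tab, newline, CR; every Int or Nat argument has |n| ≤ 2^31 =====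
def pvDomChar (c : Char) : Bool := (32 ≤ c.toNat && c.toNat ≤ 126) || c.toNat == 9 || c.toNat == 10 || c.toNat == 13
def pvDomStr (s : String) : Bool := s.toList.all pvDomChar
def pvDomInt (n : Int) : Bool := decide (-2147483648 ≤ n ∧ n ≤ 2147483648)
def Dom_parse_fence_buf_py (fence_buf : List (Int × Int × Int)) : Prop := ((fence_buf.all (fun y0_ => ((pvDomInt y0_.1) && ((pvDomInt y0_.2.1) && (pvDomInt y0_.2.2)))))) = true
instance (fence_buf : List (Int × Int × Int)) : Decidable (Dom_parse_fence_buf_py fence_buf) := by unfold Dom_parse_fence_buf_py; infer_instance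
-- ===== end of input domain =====

-- B replaces A's element-by-element fold (mutable current/expected state) by index-based
-- chunking driven by the leading vertex_count of each group (objective: simpler).

-- ===== PORT A =====
-- A's for-loop, transcribed as structural recursion over the same state
-- (polygons, current, expected); the trailing 'if current:' is the base case.
def parse_fence_buf_goA : List (Int × Int × Int) → List (List (List Int)) → List (List Int) → Int → List (List (List Int))
  | [], polygons, current, _ =>
      if current ≠ [] then polygons ++ [current] else polygons
  | (lat, lon, vertex_count) :: rest, polygons, current, expected =>
      let expected := if expected = 0 then vertex_count else expected
      let current := current ++ [[lat, lon]]
      if (current.length : Int) ≥ expected then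
        parse_fence_buf_goA rest (polygons ++ [current]) [] 0
      else
        parse_fence_buf_goA rest polygons current expected

def parse_fence_buf_py (fence_buf : List (Int × Int × Int)) : List (List (List Int)) :=
  parse_fence_buf_goA fence_buf [] [] 0

-- ===== PORT B =====
-- B's while loop over an index pointer, transcribed as recursion on the remaining slice.
def parse_fence_buf_goB (l : List (Int × Int × Int)) : List (List (List Int)) :=
  match l with
  | [] => []
  | x :: rest =>
      let size : Nat := if x.2.2 > 0 then x.2.2.toNat else 1
      ((x :: rest).take size).map (fun t => [t.1, t.2.1])
        :: parse_fence_buf_goB ((x :: rest).drop size)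
termination_by l.length
decreasing_by
  simp only [List.length_drop, List.length_cons]
  split <;> omega

def parse_fence_buf_py_alt (fence_buf : List (Int × Int × Int)) : List (List (List Int)) :=
  parse_fence_buf_goB fence_buf

-- ===== PRECONDITION & SPEC =====
def Spec_parse_fence_buf_py (fence_buf : List (Int × Int × Int)) (out : List (List (List Int))) : Prop := out = parse_fence_buf_py_alt fence_buf
instance (fence_buf : List (Int × Int × Int)) (out : List (List (List Int))) : Decidable (Spec_parse_fence_buf_py fence_buf out) := by unfold Spec_parse_fence_buf_py; infer_instance

-- ===== CLAIM (what is proved, stated in full; the proofs are below) =====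
def Claim_equal_parse_fence_buf_py : Prop := ∀ (fence_buf : List (Int × Int × Int)), Dom_parse_fence_buf_py fence_buf → Spec_parse_fence_buf_py fence_buf (parse_fence_buf_py fence_buf)

-- ===== LEMMAS AND PROOFS =====

-- unfolding lemmas for the well-founded recursion of parse_fence_buf_goB
theorem goB_nil : parse_fence_buf_goB [] = [] := by
  unfold parse_fence_buf_goB
  rfl

theorem goB_cons (x : Int × Int × Int) (rest : List (Int × Int × Int)) :
    parse_fence_buf_goB (x :: rest)
      = ((x :: rest).take (if x.2.2 > 0 then x.2.2.toNat else 1)).map (fun t => [t.1, t.2.1])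
        :: parse_fence_buf_goB ((x :: rest).drop (if x.2.2 > 0 then x.2.2.toNat else 1)) := by
  conv_lhs => unfold parse_fence_buf_goB

-- Mid-chunk invariant: with a nonempty current group still needing k+1 more vertices,
-- A's loop either completes the group from the next k+1 tuples and resets, or exhausts
-- the buffer and flushes the partial group.
theorem parse_fence_buf_mid (l : List (Int × Int × Int)) :
    ∀ (k : Nat) (polygons : List (List (List Int))) (current : List (List Int)),
      current ≠ [] →
      parse_fence_buf_goA l polygons current ((current.length : Int) + k + 1) =
        if k + 1 ≤ l.length then
          parse_fence_buf_goA (l.drop (k+1))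
            (polygons ++ [current ++ (l.take (k+1)).map (fun t => [t.1, t.2.1])]) [] 0
        else
          polygons ++ [current ++ l.map (fun t => [t.1, t.2.1])] := by
  induction l with
  | nil =>
      intro k polygons current hc
      simp [parse_fence_buf_goA, hc]
  | cons x rest ih =>
      intro k polygons current hc
      obtain ⟨lat, lon, vc⟩ := x
      have hne : ((current.length : Int) + k + 1) ≠ 0 := by positivity
      cases k with
      | zero =>
          simp only [parse_fence_buf_goA, if_neg hne]
          have hge : (((current ++ [[lat, lon]]).length : Int)) ≥ (current.length : Int) + ((0 : Nat) : Int) + 1 := by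
            simp
          rw [if_pos hge, if_pos (by simp)]
          simp
      | succ k' =>
          simp only [parse_fence_buf_goA, if_neg hne]
          have hlt : ¬ (((current ++ [[lat, lon]]).length : Int)) ≥ (current.length : Int) + ((k' + 1 : Nat) : Int) + 1 := by
            simp only [List.length_append, List.length_cons, List.length_nil]
            push_cast
            omega
          rw [if_neg hlt]
          have harg : ((current.length : Int) + ((k' + 1 : Nat) : Int) + 1)
              = (((current ++ [[lat, lon]]).length : Int) + k' + 1) := by
            simp
            ring
          rw [harg, ih k' polygons (current ++ [[lat, lon]]) (by simp)]
          by_cases hlen : k' + 1 ≤ rest.length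
          · rw [if_pos hlen, if_pos (by simp; omega)]
            simp [List.take_succ_cons, List.drop_succ_cons]
          · rw [if_neg hlen, if_neg (by simp; omega)]
            simp

-- Main invariant: from a fresh group state, A's loop produces exactly B's chunking,
-- appended to the accumulated polygons.
theorem parse_fence_buf_main (n : Nat) :
    ∀ (l : List (Int × Int × Int)), l.length ≤ n →
      ∀ (polygons : List (List (List Int))),
        parse_fence_buf_goA l polygons [] 0 = polygons ++ parse_fence_buf_goB l := by
  induction n with
  | zero =>
      intro l hl polygons
      match l, hl with
      | [], _ => simp [parse_fence_buf_goA, goB_nil]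
  | succ n ih =>
      intro l hl polygons
      match l with
      | [] => simp [parse_fence_buf_goA, goB_nil]
      | (lat, lon, vc) :: rest =>
          rw [goB_cons]
          simp only [parse_fence_buf_goA, List.nil_append, reduceIte]
          by_cases hvc : ((([[lat, lon]] : List (List Int)).length : Int)) ≥ vc
          · -- group closes immediately; B's chunk size is 1
            have hsize : (if vc > 0 then vc.toNat else 1) = 1 := by
              simp at hvc; split <;> omega
            rw [if_pos hvc]
            rw [ih rest (by simp at hl; omega) (polygons ++ [[[lat, lon]]])]
            simp [hsize, List.take, List.drop]
          · -- vc ≥ 2: the group needs vc - 1 more vertices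
            rw [if_neg hvc]
            obtain ⟨m, rfl⟩ : ∃ m : Nat, vc = (m : Int) + 2 := by
              refine ⟨(vc - 2).toNat, ?_⟩
              simp at hvc
              omega
            have hsz : (if (m : Int) + 2 > 0 then ((m : Int) + 2).toNat else 1) = m + 2 := by
              split <;> omega
            rw [hsz]
            have he : ((m : Int) + 2) = (([[lat, lon]] : List (List Int)).length : Int) + ((m : Nat) : Int) + 1 := by
              simp
              ring
            rw [he, parse_fence_buf_mid rest m polygons [[lat, lon]] (by simp)]
            by_cases hlen : m + 1 ≤ rest.length
            · rw [if_pos hlen]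
              rw [ih (rest.drop (m + 1)) (by simp at hl ⊢; omega)]
              simp [List.take_succ_cons, List.drop_succ_cons]
            · rw [if_neg hlen]
              have h1 : (rest.take (m + 1)) = rest := List.take_of_length_le (by omega)
              simp at hlen
              have h2 : (rest.drop (m + 1)) = [] := List.drop_eq_nil_of_le (by omega)
              simp [List.take_succ_cons, List.drop_succ_cons,
                List.take_of_length_le (show rest.length ≤ m + 1 by omega),
                List.drop_eq_nil_of_le (show rest.length ≤ m + 1 by omega), goB_nil]

-- ===== VERDICT (by name: the statement is the Claim_ definition above) =====
theorem parse_fence_buf_py_spec : Claim_equal_parse_fence_buf_py := by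
  intro fence_buf _
  unfold Spec_parse_fence_buf_py parse_fence_buf_py parse_fence_buf_py_alt
  simpa using parse_fence_buf_main fence_buf.length fence_buf le_rfl []
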